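-- pv_equiv track=rewrite | github.com/kamyu104/LeetCode-Solutions | Python/count-residue-prefixes.py | residuePrefixes
-- ===== SOURCE A (Python) =====
-- def residuePrefixes(s):
--     """
--     :type s: str
--     :rtype: int
--     """
--     result = distinct = 0
--     lookup = [False]*26
--     for i, x in enumerate(s):
--         if not lookup[ord(x)-ord('a')]:
--             distinct += 1
--             if distinct >= 3:
--                 break
--         lookup[ord(x)-ord('a')] = True
--         if distinct == (i+1)%3:
--             result += 1
--     return result
-- ===== SOURCE B (Python) =====
-- def _cnt(lo, hi, r):
--     # number of integers L in [lo, hi] with L % 3 == r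
--     if hi < lo:
--         return 0
--     return (hi - r) // 3 - (lo - 1 - r) // 3
--
-- def residuePrefixes(s):
--     n = len(s)
--     b = c = n + 1  # 1-based prefix lengths where the 2nd / 3rd distinct char first appears
--     lookup = [False] * 26
--     distinct = 0
--     for i, x in enumerate(s):
--         if not lookup[ord(x) - ord('a')]:
--             lookup[ord(x) - ord('a')] = True
--             distinct += 1
--             if distinct == 2:
--                 b = i + 1
--             elif distinct == 3:
--                 c = i + 1
--                 break
--     # prefixes of length L in [1, b-1] have 1 distinct char, in [b, c-1] have 2
--     return _cnt(1, b - 1, 1) + _cnt(b, c - 1, 2)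
-- ===== Notes on version B (the rewrite author's own statement) =====
-- stated objective: faster
-- what changed: B drops A's per-position incremental residue test (a modulo comparison and result update at every character): it scans only to locate the 1-based prefix lengths b and c at which the 2nd and 3rd distinct character first appear (using the same 26-flag seen-array, so it raises exactly where A does), then counts each of the two segments in O(1) with a closed-form count of integers in [lo,hi] congruent to r mod 3.
import Mathlib
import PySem

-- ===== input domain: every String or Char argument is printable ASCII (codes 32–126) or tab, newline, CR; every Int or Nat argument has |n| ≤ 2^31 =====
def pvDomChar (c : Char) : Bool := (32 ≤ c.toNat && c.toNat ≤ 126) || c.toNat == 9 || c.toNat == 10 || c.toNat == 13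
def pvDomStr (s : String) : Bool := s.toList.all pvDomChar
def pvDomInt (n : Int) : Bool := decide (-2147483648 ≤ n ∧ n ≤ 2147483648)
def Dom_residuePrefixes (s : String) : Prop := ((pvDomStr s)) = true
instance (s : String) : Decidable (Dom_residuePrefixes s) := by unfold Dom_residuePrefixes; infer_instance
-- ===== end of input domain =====

-- B drops A's per-position incremental residue test: it scans only to locate the prefix lengths where
-- the 2nd/3rd distinct character first appears, then counts each segment with a closed-form modular count.

-- ===== PORT A =====
/-- Hand port of Python's list item assignment `l[idx] = v`: exact for `-len l ≤ idx < len l`;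
    outside that range Python raises IndexError (such inputs are excluded by `Pre_`). -/
def pySetIdx (l : List Bool) (idx : Int) (v : Bool) : List Bool :=
  if 0 ≤ idx then l.set idx.toNat v else l.set (l.length - (-idx).toNat) v

/-- A's loop: `i` the enumerate index, `result`, `distinct`, `lookup` the 26-flag list. -/
def goA : List Char → Nat → Int → Int → List Bool → Int
  | [], _, result, _, _ => result
  | x :: rest, i, result, distinct, lookup =>
    let idx : Int := (x.toNat : Int) - 97
    -- `lookup[ord(x)-ord('a')]`: pyGetD models Python indexing (incl. negative wraparound);
    -- the IndexError cases (index outside [-26,26)) are excluded by Pre_.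
    if PySem.List.pyGetD lookup idx false = false then
      let distinct' := distinct + 1
      if distinct' ≥ 3 then result            -- break
      else
        let lookup' := pySetIdx lookup idx true
        let result' := if distinct' = PySem.Int.mod ((i : Int) + 1) 3 then result + 1 else result
        goA rest (i + 1) result' distinct' lookup'
    else
      let lookup' := pySetIdx lookup idx true
      let result' := if distinct = PySem.Int.mod ((i : Int) + 1) 3 then result + 1 else result
      goA rest (i + 1) result' distinct lookup'

def residuePrefixes (s : String) : Int :=
  goA s.toList 0 0 0 (List.replicate 26 false)

-- ===== PORT B =====
/-- number of integers L in [lo, hi] with L % 3 == r (Source B's `_cnt`) -/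
def cntMod3 (lo hi r : Int) : Int :=
  if hi < lo then 0
  else PySem.Int.floordiv (hi - r) 3 - PySem.Int.floordiv (lo - 1 - r) 3

/-- B's scan: the pair (b, c) of 1-based prefix lengths at which the 2nd and 3rd distinct
    character first appears (both start at len(s)+1); same 26-flag seen-array as A
    (`pyGetD`/`pySetIdx` as in port A; its IndexError cases are excluded by `Pre_`). -/
def goB : List Char → Nat → Int → Int → Int → List Bool → Int × Int
  | [], _, b, c, _, _ => (b, c)
  | x :: rest, i, b, c, distinct, lookup =>
    if PySem.List.pyGetD lookup ((x.toNat : Int) - 97) false = false then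
      let lookup' := pySetIdx lookup ((x.toNat : Int) - 97) true
      if distinct + 1 = 2 then goB rest (i + 1) ((i : Int) + 1) c (distinct + 1) lookup'
      else if distinct + 1 = 3 then (b, (i : Int) + 1)   -- break
      else goB rest (i + 1) b c (distinct + 1) lookup'
    else
      goB rest (i + 1) b c distinct lookup

def residuePrefixes_alt (s : String) : Int :=
  let n : Int := PySem.Str.len s
  let bc := goB s.toList 0 (n + 1) (n + 1) 0 (List.replicate 26 false)
  cntMod3 1 (bc.1 - 1) 1 + cntMod3 bc.1 (bc.2 - 1) 2

-- ===== PRECONDITION & SPEC =====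
-- Pre_ excludes exactly the strings on which A (and B alike) RAISES IndexError: a character scanned
-- before the break (i.e. before the third distinct character) whose code is outside [71,122], so that
-- `ord(x)-97` falls outside the index range [-26,26) of the 26-flag list.  On every input where A
-- returns a value, Pre_ holds.
/-- flag slot the 26-entry list stores `x` at (codes 71..122; a negative index wraps):
    `(ord(x) - 97) mod 26` -/
def slotOf (x : Char) : Nat := (x.toNat - 71) % 26

/-- every character scanned (up to and including the third distinct one) has code 71..122
    (`seen` = flag slots of the distinct characters met so far) -/
def okPrefix3 : List Char → List Nat → Bool
  | [], _ => true
  | x :: rest, seen =>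
    if 71 ≤ x.toNat ∧ x.toNat ≤ 122 then
      if slotOf x ∈ seen then okPrefix3 rest seen
      else if seen.length = 2 then true
      else okPrefix3 rest (slotOf x :: seen)
    else false

def Pre_residuePrefixes (s : String) : Prop :=
  okPrefix3 s.toList [] = true
instance (s : String) : Decidable (Pre_residuePrefixes s) := by unfold Pre_residuePrefixes; infer_instance

def pvWitness_residuePrefixes : String := "aabcb"

def Spec_residuePrefixes (s : String) (out : Int) : Prop := out = residuePrefixes_alt s
instance (s : String) (out : Int) : Decidable (Spec_residuePrefixes s out) := by unfold Spec_residuePrefixes; infer_instance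

-- ===== CLAIM (what is proved, stated in full; the proofs are below) =====
def Claim_equal_residuePrefixes : Prop := ∀ (s : String), Dom_residuePrefixes s → Pre_residuePrefixes s → Spec_residuePrefixes s (residuePrefixes s)

-- ===== LEMMAS AND PROOFS =====

lemma cnt_nil {lo hi r : Int} (h : hi < lo) : cntMod3 lo hi r = 0 := by
  simp [cntMod3, h]

lemma cnt_succ (lo hi r : Int) (h : lo ≤ hi + 1) (hr : 0 ≤ r ∧ r < 3) :
    cntMod3 lo (hi + 1) r = cntMod3 lo hi r + (if r = PySem.Int.mod (hi + 1) 3 then 1 else 0) := by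
  have h3 : (0 : Int) < 3 := by norm_num
  unfold cntMod3
  simp only [PySem.Int.floordiv_eq_ediv_of_pos h3, PySem.Int.mod_eq_emod_of_pos h3]
  split_ifs <;> omega

lemma slotOf_lt (x : Char) : slotOf x < 26 := Nat.mod_lt _ (by norm_num)

/-- the flag the ports read is the one at `slotOf x` (Python wraparound on a negative index) -/
lemma flag_eq (lookup : List Bool) (x : Char)
    (hx1 : 71 ≤ x.toNat) (hx2 : x.toNat ≤ 122) (hlen : lookup.length = 26) :
    PySem.List.pyGetD lookup ((x.toNat : Int) - 97) false = lookup.getD (slotOf x) false := by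
  by_cases h : 97 ≤ x.toNat
  · have hidx : ((x.toNat : Int) - 97) = ((x.toNat - 97 : Nat) : Int) := by omega
    rw [hidx, PySem.List.pyGetD_natCast, show slotOf x = x.toNat - 97 from by unfold slotOf; omega]
  · simp only [PySem.List.pyGetD, PySem.List.pyGet?, PySem.List.pyIdx?, hlen]
    rw [if_neg (show ¬ (0 : Int) ≤ (x.toNat : Int) - 97 from by omega)]
    split_ifs with h1
    · rw [show 26 - (-(((x.toNat : Int)) - 97)).toNat = slotOf x from by unfold slotOf; omega]
      simp [List.getD_eq_getElem?_getD]
    · exfalso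
      push_cast at h1
      omega

/-- the flag the ports write is the one at `slotOf x` -/
lemma setIdx_eq (lookup : List Bool) (x : Char)
    (hx1 : 71 ≤ x.toNat) (hx2 : x.toNat ≤ 122) (hlen : lookup.length = 26) :
    pySetIdx lookup ((x.toNat : Int) - 97) true = lookup.set (slotOf x) true := by
  unfold pySetIdx
  by_cases h : 97 ≤ x.toNat
  · rw [if_pos (by omega)]
    congr 1
    unfold slotOf; omega
  · rw [if_neg (by omega), hlen]
    congr 1
    unfold slotOf; omega

/-- re-setting an already-true flag does not change the list -/
lemma set_self (l : List Bool) (n : Nat) (h : l.getD n false = true) : l.set n true = l := by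
  refine List.ext_getElem (by simp) ?_
  intro j hj hj'
  rw [List.getElem_set]
  split_ifs with he
  · have h' : l.getD j false = true := he ▸ h
    have hg : l.getD j false = l[j] := by
      simp [List.getD, List.getElem?_eq_getElem hj']
    rw [← hg, h']
  · rfl

/-- setting the flag at slot `sl` updates the flag/slot-list correspondence -/
lemma lookup_set_inv (lookup : List Bool) (Q : List Nat) (sl : Nat)
    (hsl : sl < 26) (hlen : lookup.length = 26)
    (hlk : ∀ j : Nat, j < 26 → (lookup.getD j false = true ↔ j ∈ Q)) :
    ∀ j : Nat, j < 26 → ((lookup.set sl true).getD j false = true ↔ (j = sl ∨ j ∈ Q)) := by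
  intro j hj
  by_cases hje : j = sl
  · subst hje
    have hlt : j < lookup.length := by omega
    have hl : (lookup.set j true).getD j false = true := by
      simp [List.getD, hlt]
    rw [hl]
    simp
  · have hne : sl ≠ j := fun h => hje h.symm
    have hsame : (lookup.set sl true).getD j false = lookup.getD j false := by
      simp [List.getD, List.getElem?_set_ne hne]
    rw [hsame, hlk j hj]
    simp [hje]

/-- Main invariant: A's loop equals B's closed-form count of B's scan result.
    `Q` is the list of distinct flag slots met so far (as tracked by `Pre_`'s walker). -/
lemma goA_eq_goB : ∀ (l : List Char) (i : Nat) (resA : Int)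
    (lookup : List Bool) (b c d : Int) (Q : List Nat),
    okPrefix3 l Q = true →
    lookup.length = 26 →
    (∀ j : Nat, j < 26 → (lookup.getD j false = true ↔ j ∈ Q)) →
    d = (Q.length : Int) →
    c = (i : Int) + l.length + 1 →
    ((Q.length ≤ 1 ∧ b = c ∧ resA = cntMod3 1 (i : Int) 1) ∨
     (Q.length = 2 ∧ 1 ≤ b ∧ b ≤ (i : Int) ∧
       resA = cntMod3 1 (b - 1) 1 + cntMod3 b (i : Int) 2)) →
    goA l i resA d lookup =
      cntMod3 1 ((goB l i b c d lookup).1 - 1) 1 +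
      cntMod3 (goB l i b c d lookup).1 ((goB l i b c d lookup).2 - 1) 2 := by
  intro l
  induction l with
  | nil =>
    intro i resA lookup b c d Q _ _ _ _ hc hres
    simp only [List.length_nil, Nat.cast_zero] at hc
    simp only [goA, goB]
    rcases hres with ⟨_, hb, hr⟩ | ⟨_, hb1, hb2, hr⟩
    · rw [hr, hb]
      rw [show c - 1 = (i : Int) from by omega]
      rw [cnt_nil (show (i : Int) < c from by omega)]
      ring
    · rw [hr, show c - 1 = (i : Int) from by omega]
  | cons x rest ih =>
    intro i resA lookup b c d Q hlp hlen hlk hd hc hres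
    simp only [okPrefix3] at hlp
    by_cases hlc : 71 ≤ x.toNat ∧ x.toNat ≤ 122
    case neg =>
      rw [if_neg hlc] at hlp
      exact absurd hlp (by simp)
    obtain ⟨hx1, hx2⟩ := hlc
    rw [if_pos ⟨hx1, hx2⟩] at hlp
    have hc' : c = ((i + 1 : Nat) : Int) + rest.length + 1 := by
      rw [hc]; simp only [List.length_cons]; push_cast; ring
    have hlen' : (lookup.set (slotOf x) true).length = 26 := by simp [hlen]
    have hi1 : ((i + 1 : Nat) : Int) = (i : Int) + 1 := by push_cast; ring
    simp only [goA, goB]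
    rw [flag_eq lookup x hx1 hx2 hlen, setIdx_eq lookup x hx1 hx2 hlen]
    by_cases hmem : slotOf x ∈ Q
    · -- slot already seen: both flag tests see `true`; A re-sets the flag (a no-op)
      have hpos : 1 ≤ Q.length := List.length_pos_of_mem hmem
      have hflagT : lookup.getD (slotOf x) false = true :=
        (hlk (slotOf x) (slotOf_lt x)).2 hmem
      have hA : ¬ lookup.getD (slotOf x) false = false := by
        rw [hflagT]; exact fun h => nomatch h
      rw [if_neg hA, if_neg hA]
      rw [if_pos hmem] at hlp
      rw [set_self lookup (slotOf x) hflagT]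
      refine ih (i + 1) _ lookup b c d Q hlp hlen hlk hd hc' ?_
      rcases hres with ⟨hsz, hb, hr⟩ | ⟨hsz, hb1, hb2, hr⟩
      · left
        have hsz1 : Q.length = 1 := by omega
        refine ⟨by omega, hb, ?_⟩
        rw [hd, hsz1, Nat.cast_one, hr, hi1,
          cnt_succ 1 (i : Int) 1 (by omega) (by omega)]
        split_ifs <;> ring
      · right
        refine ⟨hsz, hb1, by rw [hi1]; omega, ?_⟩
        rw [hd, hsz, Nat.cast_ofNat, hr, hi1,
          cnt_succ b (i : Int) 2 (by omega) (by omega)]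
        split_ifs <;> ring
    · -- new character: both flag tests see `false`, both write the flag
      have hflagF : lookup.getD (slotOf x) false = false := by
        rcases Bool.eq_false_or_eq_true (lookup.getD (slotOf x) false) with h | h
        · exact absurd ((hlk (slotOf x) (slotOf_lt x)).1 h) hmem
        · exact h
      rw [if_pos hflagF, if_pos hflagF]
      rw [if_neg hmem] at hlp
      have hlk' : ∀ j : Nat, j < 26 →
          ((lookup.set (slotOf x) true).getD j false = true ↔ j ∈ slotOf x :: Q) := by
        intro j hj
        rw [lookup_set_inv lookup Q (slotOf x) (slotOf_lt x) hlen hlk j hj, List.mem_cons]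
      rcases hres with ⟨hsz, hb, hr⟩ | ⟨hsz, hb1, hb2, hr⟩
      · -- distinct was 0 or 1: no break
        rw [if_neg (show ¬ d + 1 ≥ 3 from by rw [hd]; omega)]
        rw [if_neg (show ¬ Q.length = 2 from by omega)] at hlp
        rcases Nat.le_one_iff_eq_zero_or_eq_one.mp hsz with hszc | hszc
        · -- 0 distinct: becomes 1
          rw [if_neg (show ¬ d + 1 = 2 from by rw [hd, hszc]; norm_num),
              if_neg (show ¬ d + 1 = 3 from by rw [hd, hszc]; norm_num)]
          refine ih (i + 1) _ _ b c (d + 1) (slotOf x :: Q) hlp hlen' hlk'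
            (by simp [hd, hszc]) hc' ?_
          left
          refine ⟨by simp [hszc], hb, ?_⟩
          rw [hd, hszc, Nat.cast_zero, zero_add, hr, hi1,
            cnt_succ 1 (i : Int) 1 (by omega) (by omega)]
          split_ifs <;> ring
        · -- 1 distinct: becomes 2, b is set to i+1
          rw [if_pos (show d + 1 = 2 from by rw [hd, hszc]; norm_num)]
          refine ih (i + 1) _ _ ((i : Int) + 1) c (d + 1) (slotOf x :: Q) hlp hlen' hlk'
            (by simp [hd, hszc]) hc' ?_
          right
          refine ⟨by simp [hszc], by omega, by rw [hi1], ?_⟩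
          rw [hd, hszc, Nat.cast_one, hr, hi1]
          rw [show (i : Int) + 1 - 1 = (i : Int) from by ring]
          rw [cnt_succ ((i : Int) + 1) (i : Int) 2 (by omega) (by omega)]
          rw [cnt_nil (show (i : Int) < (i : Int) + 1 from by omega)]
          rw [show (1 : Int) + 1 = 2 from by norm_num]
          split_ifs <;> ring
      · -- distinct was 2: becomes 3, both sides break
        rw [if_pos (show d + 1 ≥ 3 from by rw [hd, hsz]; norm_num)]
        rw [if_neg (show ¬ d + 1 = 2 from by rw [hd, hsz]; norm_num),
            if_pos (show d + 1 = 3 from by rw [hd, hsz]; norm_num)]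
        rw [hr]
        rw [show (i : Int) + 1 - 1 = (i : Int) from by ring]

theorem residuePrefixes_eq (s : String) (hpre : Pre_residuePrefixes s) :
    residuePrefixes s = residuePrefixes_alt s := by
  unfold Pre_residuePrefixes at hpre
  simp only [residuePrefixes, residuePrefixes_alt]
  have hn : PySem.Str.len s = (s.toList.length : Int) := by
    simp [pysem]
  rw [hn]
  exact goA_eq_goB s.toList 0 0 (List.replicate 26 false)
    ((s.toList.length : Int) + 1) ((s.toList.length : Int) + 1) 0 []
    hpre (by simp)
    (fun j hj => by
      rw [List.getD_replicate]
      · simp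
      · exact hj)
    (by norm_num)
    (by norm_num)
    (Or.inl ⟨by norm_num, rfl, (cnt_nil (by omega)).symm⟩)

-- ===== VERDICT (by name: the statement is the Claim_ definition above) =====
theorem residuePrefixes_spec : Claim_equal_residuePrefixes := by
  intro s _ hpre
  unfold Spec_residuePrefixes
  exact residuePrefixes_eq s hpre
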